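-- pv_equiv track=rewrite | github.com/saaim12/DSA-Python | Arrays/Problems/permutation_and_matrix_operations.py | remove_duplicates_three
-- ===== SOURCE A (Python) =====
-- def remove_duplicates_three(arr):
--     """
--     Remove duplicates from a sorted array allowing at most 3 occurrences.
--     Returns new length.
--     """
--     if len(arr) <= 3:
--         return len(arr)
--
--     k = 3  # first three elements are always valid
--
--     for i in range(3, len(arr)):
--         if arr[i] != arr[k-3]:
--             arr[k] = arr[i]
--             k += 1
--
--     return k
-- ===== SOURCE B (Python) =====
-- def remove_duplicates_three(arr):
--     """
--     Remove duplicates from a sorted array allowing at most 3 occurrences.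
--     Returns new length. (Run-compression: scans maximal runs of equal values
--     and, per run, adds the kept count in one step -- min(run length, position
--     of the value in the window of the last three kept, or 3 if absent) --
--     then shifts the window by that amount. Return-value equivalence only:
--     unlike A, this does not mutate arr.)
--     """
--     n = len(arr)
--     if n <= 3:
--         return n
--     w = [arr[0], arr[1], arr[2]]  # last three kept values
--     k = 3
--     i = 3
--     while i < n:
--         v = arr[i]
--         j = i + 1
--         while j < n and arr[j] == v:
--             j += 1
--         run = j - i
--         idx = w.index(v) if v in w else 3
--         m = run if run < idx else idx
--         k += m
--         w = w[m:] + [v] * m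
--         i = j
--     return k
-- ===== Notes on version B (the rewrite author's own statement) =====
-- stated objective: alternative
-- what changed: B replaces A's per-element pass (compare each element with the third-last kept one via the arr[k-3] lookback and rewrite arr in place) by run compression: it scans each maximal run of equal values once and adds that run's kept count in a single step, min(run length, position of the value in the window of the last three kept values, or 3 if absent), then shifts the window by that count; B never writes to arr (return-value equivalence only).
import Mathlib
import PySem

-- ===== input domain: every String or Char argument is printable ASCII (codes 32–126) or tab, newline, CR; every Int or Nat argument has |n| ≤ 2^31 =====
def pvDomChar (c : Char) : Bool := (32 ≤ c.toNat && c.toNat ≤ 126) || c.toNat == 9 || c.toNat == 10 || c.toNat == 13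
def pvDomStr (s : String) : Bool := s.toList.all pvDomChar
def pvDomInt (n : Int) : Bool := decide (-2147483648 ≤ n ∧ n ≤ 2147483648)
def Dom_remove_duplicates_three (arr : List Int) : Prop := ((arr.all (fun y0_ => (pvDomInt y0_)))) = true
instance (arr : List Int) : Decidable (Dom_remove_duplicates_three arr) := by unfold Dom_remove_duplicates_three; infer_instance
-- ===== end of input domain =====

-- B replaces A's per-element write-index/lookback pass by run compression: it scans maximal
-- runs of equal values and adds each run's kept count in one step (min of run length and the
-- value's position in the window of the last three kept). Return-value equivalence only:
-- A mutates arr in place, B does not.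

-- ===== PORT A =====
-- Loop indices of range(3, len(arr)) are nonnegative, ported as Nat via List.range'.
-- All reads arr[i], arr[k-3] and the write arr[k] are in range in A (3 ≤ k ≤ i < len),
-- so getD 0 / List.set are exact here; k-3 is Nat subtraction, exact since k ≥ 3.
def remove_duplicates_three (arr : List Int) : Int :=
  if arr.length ≤ 3 then (arr.length : Int)
  else
    let st := (List.range' 3 (arr.length - 3)).foldl
      (fun (st : List Int × Nat) i =>
        if st.1.getD i 0 ≠ st.1.getD (st.2 - 3) 0 then
          (st.1.set st.2 (st.1.getD i 0), st.2 + 1)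
        else st)
      (arr, 3)
    (st.2 : Int)

-- ===== PORT B =====
-- Source B's outer while-loop over runs, as structural recursion: the inner while-loop that
-- scans the current run is takeWhile (its length is j - i) / dropWhile (the jump i := j);
-- 'w.index(v) if v in w else 3' is index? with getD 3; 'w[m:]' is slice (0 ≤ m);
-- '[v] * m' is List.replicate m.toNat (exact: 0 ≤ m).
def rdtBRun : List Int → List Int → Int → Int
  | [], _, k => k
  | x :: t, w, k =>
    let run : Int := 1 + ((t.takeWhile (fun y => y = x)).length : Int)
    let idx : Int := ((PySem.List.index? w x).map (fun i => (i : Int))).getD 3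
    let m : Int := if run < idx then run else idx
    rdtBRun (t.dropWhile (fun y => y = x))
      (PySem.List.slice w (some m) none ++ List.replicate m.toNat x) (k + m)
termination_by l => l.length
decreasing_by
  simp only [List.length_cons]
  have := List.length_dropWhile_le (fun y => y = x) t
  omega

def remove_duplicates_three_alt (arr : List Int) : Int :=
  if arr.length ≤ 3 then (arr.length : Int)
  else
    match arr with
    | a :: b :: c :: rest => rdtBRun rest [a, b, c] 3
    | _ => 0  -- unreachable: length > 3

-- ===== PRECONDITION & SPEC =====
def Spec_remove_duplicates_three (arr : List Int) (out : Int) : Prop := out = remove_duplicates_three_alt arr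
instance (arr : List Int) (out : Int) : Decidable (Spec_remove_duplicates_three arr out) := by unfold Spec_remove_duplicates_three; infer_instance

-- ===== CLAIM (what is proved, stated in full; the proofs are below) =====
def Claim_equal_remove_duplicates_three : Prop := ∀ (arr : List Int), Dom_remove_duplicates_three arr → Spec_remove_duplicates_three arr (remove_duplicates_three arr)

-- ===== LEMMAS AND PROOFS =====

theorem drop_set_of_lt (l : List Int) (i j : Nat) (x : Int) (h : i < j) :
    (l.set i x).drop j = l.drop j := by
  apply List.ext_getElem?
  intro m
  rw [List.getElem?_drop, List.getElem?_drop, List.getElem?_set_ne (by omega)]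

theorem getD_set_ne (l : List Int) (i j : Nat) (x : Int) (h : i ≠ j) :
    (l.set i x).getD j 0 = l.getD j 0 := by
  simp [List.getD, List.getElem?_set_ne h]

theorem getD_set_self (l : List Int) (i : Nat) (x : Int) (h : i < l.length) :
    (l.set i x).getD i 0 = x := by
  simp [List.getD, h]

-- Reference fold with the window of the last three kept values; A's array state at write
-- position k stores them at positions k-3, k-2, k-1, and positions ≥ j hold the suffix.
theorem rdt_loop_eq (rest : List Int) :
    ∀ (A : List Int) (j k : Nat) (a b c : Int),
    3 ≤ k → k ≤ j → A.drop j = rest →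
    A.getD (k - 3) 0 = a → A.getD (k - 2) 0 = b → A.getD (k - 1) 0 = c →
    ((((List.range' j rest.length).foldl
        (fun (st : List Int × Nat) i =>
          if st.1.getD i 0 ≠ st.1.getD (st.2 - 3) 0 then
            (st.1.set st.2 (st.1.getD i 0), st.2 + 1)
          else st) (A, k)).2 : Nat) : Int)
      = (rest.foldl
          (fun (st : Int × Int × Int × Int) x =>
            if x ≠ st.1 then (st.2.1, st.2.2.1, x, st.2.2.2 + 1) else st)
          (a, b, c, (k : Int))).2.2.2 := by
  induction rest with
  | nil => intro A j k a b c _ _ _ _ _ _; simp [List.foldl]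
  | cons x rest ih =>
    intro A j k a b c hk3 hkj hdrop ha hb hc
    have hjlen : j < A.length := by
      by_contra h
      have hnil : A.drop j = [] := List.drop_eq_nil_of_le (by omega)
      rw [hnil] at hdrop; simp at hdrop
    have hAj : A.getD j 0 = x := by
      have h0 : (A.drop j)[0]? = some x := by rw [hdrop]; rfl
      rw [List.getElem?_drop] at h0
      simp at h0
      simp [List.getD, h0]
    have hdrop' : A.drop (j + 1) = rest := by
      have : (A.drop j).drop 1 = A.drop (j + 1) := by
        rw [List.drop_drop]
      rw [← this, hdrop]; rfl
    rw [List.length_cons, List.range'_succ, List.foldl_cons, List.foldl_cons]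
    by_cases hx : x = a
    · rw [if_neg (show ¬ (A.getD j 0 ≠ A.getD (k - 3) 0) by rw [hAj, ha]; simp [hx]),
          if_neg (show ¬ (x ≠ a) by simp [hx])]
      exact ih A (j + 1) k a b c hk3 (by omega) hdrop' ha hb hc
    · have hcond : A.getD j 0 ≠ A.getD (k - 3) 0 := by rw [hAj, ha]; exact hx
      rw [if_pos hcond, if_pos hx]
      have hkA : k < A.length := by omega
      have h1 : (A.set k (A.getD j 0)).drop (j + 1) = rest := by
        rw [drop_set_of_lt A k (j + 1) _ (by omega), hdrop']
      have h2 : (A.set k (A.getD j 0)).getD (k + 1 - 3) 0 = b := by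
        rw [show k + 1 - 3 = k - 2 by omega, getD_set_ne A k (k - 2) _ (by omega)]
        exact hb
      have h3 : (A.set k (A.getD j 0)).getD (k + 1 - 2) 0 = c := by
        rw [show k + 1 - 2 = k - 1 by omega, getD_set_ne A k (k - 1) _ (by omega)]
        exact hc
      have h4 : (A.set k (A.getD j 0)).getD (k + 1 - 1) 0 = x := by
        rw [show k + 1 - 1 = k by omega, getD_set_self A k _ hkA, hAj]
      have := ih (A.set k (A.getD j 0)) (j + 1) (k + 1) b c x
        (by omega) (by omega) h1 h2 h3 h4
      push_cast at this
      exact this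

-- Position of v in the window (a, b, c), or 3 if absent.
def widx (a b c v : Int) : Int :=
  if v = a then 0 else if v = b then 1 else if v = c then 2 else 3

-- The window after keeping m copies of v (0 ≤ m ≤ 3).
def wshift (a b c v m : Int) : Int × Int × Int :=
  if m ≤ 0 then (a, b, c) else if m = 1 then (b, c, v) else if m = 2 then (c, v, v)
  else (v, v, v)

theorem widx_nonneg (a b c v : Int) : 0 ≤ widx a b c v := by
  unfold widx; split_ifs <;> omega

theorem widx_le (a b c v : Int) : widx a b c v ≤ 3 := by
  unfold widx; split_ifs <;> omega

theorem wshift_succ (a b c v m : Int) (hm : 0 ≤ m) :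
    wshift b c v v m = wshift a b c v (m + 1) := by
  unfold wshift
  split_ifs <;> first | rfl | omega

-- The window fold over a run of copies of v keeps min(run length, widx) of them and
-- shifts the window accordingly.
theorem rdt_crun (R : List Int) :
    ∀ (a b c k v : Int), (∀ y ∈ R, y = v) →
    R.foldl
      (fun (st : Int × Int × Int × Int) x =>
        if x ≠ st.1 then (st.2.1, st.2.2.1, x, st.2.2.2 + 1) else st)
      (a, b, c, k)
    = ((wshift a b c v (min (R.length : Int) (widx a b c v))).1,
       (wshift a b c v (min (R.length : Int) (widx a b c v))).2.1,
       (wshift a b c v (min (R.length : Int) (widx a b c v))).2.2,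
       k + min (R.length : Int) (widx a b c v)) := by
  induction R with
  | nil =>
    intro a b c k v _
    have h0 : min ((List.length ([] : List Int) : Nat) : Int) (widx a b c v) = 0 := by
      have := widx_nonneg a b c v
      simp
      omega
    rw [h0]
    simp [wshift]
  | cons x R ih =>
    intro a b c k v hall
    have hx : x = v := hall x (by simp)
    subst hx
    rw [List.foldl_cons]
    by_cases hav : x = a
    · rw [if_neg (by simp [hav])]
      have hw : widx a b c x = 0 := by unfold widx; rw [if_pos hav]
      rw [ih a b c k x (fun y hy => hall y (by simp [hy])), hw]
      have h1 : min ((R.length : Nat) : Int) 0 = 0 := by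
        have : (0 : Int) ≤ (R.length : Int) := Int.natCast_nonneg _
        omega
      have h2 : min (((x :: R).length : Nat) : Int) 0 = 0 := by
        have : (0 : Int) ≤ ((x :: R).length : Int) := Int.natCast_nonneg _
        omega
      rw [h1, h2]
    · rw [if_pos hav]
      rw [ih b c x (k + 1) x (fun y hy => hall y (by simp [hy]))]
      have hwx : widx b c x x = widx a b c x - 1 := by
        unfold widx
        split_ifs <;> omega
      have hm0 : 0 ≤ min ((R.length : Nat) : Int) (widx b c x x) := by
        have h1 := Int.natCast_nonneg R.length
        have h2 := widx_nonneg b c x x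
        omega
      have hmin : min (((x :: R).length : Nat) : Int) (widx a b c x)
          = min ((R.length : Nat) : Int) (widx b c x x) + 1 := by
        have h1 : widx b c x x = widx a b c x - 1 := hwx
        have h2 : 1 ≤ widx a b c x := by
          have := widx_nonneg a b c x
          unfold widx at *
          rw [if_neg hav] at *
          split_ifs <;> omega
        have h3 : (((x :: R).length : Nat) : Int) = ((R.length : Nat) : Int) + 1 := by
          push_cast [List.length_cons]; ring
        omega
      rw [hmin, wshift_succ a b c x _ hm0]
      have : min ((R.length : Nat) : Int) (widx b c x x) + 1 + k
          = k + (min ((R.length : Nat) : Int) (widx b c x x) + 1) := by ring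
      rw [show k + 1 + min ((R.length : Nat) : Int) (widx b c x x)
          = k + (min ((R.length : Nat) : Int) (widx b c x x) + 1) from by ring]

-- Python's w.index(v)-with-default on the three-element window is widx.
theorem index_window (a b c v : Int) :
    ((PySem.List.index? [a, b, c] v).map (fun i => (i : Int))).getD 3 = widx a b c v := by
  unfold widx
  by_cases h1 : v = a
  · subst h1
    simp [PySem.List.index?_eq_idxOf?, List.idxOf?, List.findIdx?_cons]
  · have g1 : ¬ a = v := fun h => h1 h.symm
    by_cases h2 : v = b
    · subst h2
      simp [PySem.List.index?_eq_idxOf?, List.idxOf?, List.findIdx?_cons, g1, h1]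
    · have g2 : ¬ b = v := fun h => h2 h.symm
      by_cases h3 : v = c
      · subst h3
        simp [PySem.List.index?_eq_idxOf?, List.idxOf?, List.findIdx?_cons, g1, g2, h1, h2]
      · have g3 : ¬ c = v := fun h => h3 h.symm
        simp [PySem.List.index?_eq_idxOf?, List.idxOf?, List.findIdx?_cons,
          g1, g2, g3, h1, h2, h3]

-- The window fold is B's run-compressing loop.
theorem rdt_fold_brun (n : Nat) :
    ∀ (rest : List Int) (a b c k : Int), rest.length ≤ n →
    (rest.foldl
        (fun (st : Int × Int × Int × Int) x =>
          if x ≠ st.1 then (st.2.1, st.2.2.1, x, st.2.2.2 + 1) else st)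
        (a, b, c, k)).2.2.2
      = rdtBRun rest [a, b, c] k := by
  induction n with
  | zero =>
    intro rest a b c k hn
    have : rest = [] := List.eq_nil_of_length_eq_zero (by omega)
    subst this
    simp [rdtBRun]
  | succ n ih =>
    intro rest a b c k hn
    rcases rest with _ | ⟨x, t⟩
    · simp [rdtBRun]
    · have hsplit : x :: t
          = (x :: t.takeWhile (fun y => y = x)) ++ t.dropWhile (fun y => y = x) := by
        simp [List.takeWhile_append_dropWhile]
      have hallR : ∀ y ∈ x :: t.takeWhile (fun y => y = x), y = x := by
        intro y hy
        rcases List.mem_cons.mp hy with h | h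
        · exact h
        · simpa using List.mem_takeWhile_imp h
      conv_lhs => rw [hsplit]
      rw [List.foldl_append, rdt_crun _ a b c k x hallR]
      set m : Int := min (((x :: t.takeWhile (fun y => y = x)).length : Nat) : Int)
        (widx a b c x) with hm
      have hrange : m = 0 ∨ m = 1 ∨ m = 2 ∨ m = 3 := by
        have h1 := widx_nonneg a b c x
        have h2 := widx_le a b c x
        have h3 : (1 : Int) ≤ (((x :: t.takeWhile (fun y => y = x)).length : Nat) : Int) := by
          push_cast [List.length_cons]
          have := Int.natCast_nonneg (t.takeWhile (fun y => y = x)).length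
          omega
        omega
      have hS : (t.dropWhile (fun y => y = x)).length ≤ n := by
        have := List.Sublist.length_le (List.dropWhile_sublist (l := t) (p := fun y => y = x))
        simp at hn
        omega
      rw [ih _ _ _ _ _ hS]
      -- unfold B's loop step and match run, idx, m and the new window
      show rdtBRun (t.dropWhile (fun y => y = x))
          [(wshift a b c x m).1, (wshift a b c x m).2.1, (wshift a b c x m).2.2] (k + m)
        = rdtBRun (x :: t) [a, b, c] k
      rw [rdtBRun]
      simp only [index_window]
      have hrun : (1 : Int) + ((t.takeWhile (fun y => y = x)).length : Int)
          = (((x :: t.takeWhile (fun y => y = x)).length : Nat) : Int) := by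
        push_cast [List.length_cons]; ring
      have hite : (if (1 : Int) + ((t.takeWhile (fun y => y = x)).length : Int) < widx a b c x
            then (1 : Int) + ((t.takeWhile (fun y => y = x)).length : Int)
            else widx a b c x) = m := by
        rw [hrun, hm]
        split_ifs <;> omega
      rw [hite]
      congr 1
      rcases hrange with h | h | h | h <;> rw [h] <;>
        simp [wshift, PySem.List.slice_from, List.replicate]

-- ===== VERDICT (by name: the statement is the Claim_ definition above) =====
theorem remove_duplicates_three_spec : Claim_equal_remove_duplicates_three := by
  intro arr _
  unfold Spec_remove_duplicates_three remove_duplicates_three remove_duplicates_three_alt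
  by_cases hlen : arr.length ≤ 3
  · simp [hlen]
  · rcases arr with _ | ⟨a, arr⟩; · simp at hlen
    rcases arr with _ | ⟨b, arr⟩; · simp at hlen
    rcases arr with _ | ⟨c, rest⟩; · simp at hlen
    simp only [if_neg hlen]
    have hdrop : (a :: b :: c :: rest).drop 3 = rest := rfl
    have hlenr : (a :: b :: c :: rest).length - 3 = rest.length := by simp
    rw [hlenr]
    rw [rdt_loop_eq rest (a :: b :: c :: rest) 3 3 a b c
      (le_refl 3) (le_refl 3) hdrop rfl rfl rfl]
    have h := rdt_fold_brun rest.length rest a b c ((3 : Nat) : Int) (le_refl _)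
    simpa using h
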